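-- pv_equiv track=rewrite | github.com/zhiyou720/nlp_preprocess | tokenizer.py | spliter
-- ===== SOURCE A (Python) =====
-- def spliter(string):
--     english = 'abcdefghijklmnopqrstuvwxyz0123456789'
--     output = []
--     buffer = ''
--     for s in string:
--         if s in english or s in english.upper():
--             buffer += s
--         else:
--             if buffer:
--                 output.append(buffer)
--             buffer = ''
--             output.append(s)
--     if buffer:
--         output.append(buffer)
--
--     while ' ' in output:
--         output.remove(' ')
--
--     return output
-- ===== SOURCE B (Python) =====
-- ALNUM = frozenset('ABCDEFGHIJKLMNOPQRSTUVWXYZabcdefghijklmnopqrstuvwxyz0123456789')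
--
--
-- def spliter(string):
--     tokens = []
--     i = 0
--     n = len(string)
--     while i < n:
--         c = string[i]
--         if c in ALNUM:
--             j = i + 1
--             while j < n and string[j] in ALNUM:
--                 j += 1
--             tokens.append(string[i:j])
--             i = j
--         elif c == ' ':
--             i += 1
--         else:
--             tokens.append(c)
--             i += 1
--     return tokens
-- ===== Notes on version B (the rewrite author's own statement) =====
-- stated objective: alternative
-- what changed: A accumulates a character buffer per step and afterwards deletes spaces by repeatedly calling list.remove(' '); B is a single forward index scan that grabs each maximal alphanumeric run with an inner scan, skips spaces outright, and never rescans its output.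
import Mathlib
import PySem

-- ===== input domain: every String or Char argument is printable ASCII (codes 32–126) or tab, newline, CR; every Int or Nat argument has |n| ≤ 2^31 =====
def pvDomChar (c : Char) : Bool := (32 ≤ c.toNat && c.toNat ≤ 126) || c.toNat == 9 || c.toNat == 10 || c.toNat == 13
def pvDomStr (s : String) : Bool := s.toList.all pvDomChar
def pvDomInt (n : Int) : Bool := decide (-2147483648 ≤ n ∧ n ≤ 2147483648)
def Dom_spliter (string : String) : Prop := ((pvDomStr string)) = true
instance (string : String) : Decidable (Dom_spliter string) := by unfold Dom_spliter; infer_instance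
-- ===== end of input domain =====

-- B replaces A's buffer state machine plus repeated-remove space deletion by a single
-- forward scan over maximal alphanumeric runs that never emits spaces (alternative algorithm).

-- ===== PORT A =====
def pvEnglish : String := "abcdefghijklmnopqrstuvwxyz0123456789"

-- loop body; the state is (output, buffer), the buffer kept as List Char
def pvStepA (st : List String × List Char) (s : Char) : List String × List Char :=
  if s ∈ pvEnglish.toList ∨ s ∈ (PySem.Str.upper pvEnglish).toList then
    (st.1, st.2 ++ [s])
  else
    ((if st.2 ≠ [] then st.1 ++ [String.ofList st.2] else st.1) ++ [String.ofList [s]], [])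

-- the post-loop 'if buffer: output.append(buffer)'
def pvFlushA (st : List String × List Char) : List String :=
  if st.2 ≠ [] then st.1 ++ [String.ofList st.2] else st.1

-- 'while ' ' in output: output.remove(' ')' ported literally: remove the first ' ' while present
def pvRemoveSpaces (l : List String) : List String :=
  if h : " " ∈ l then
    pvRemoveSpaces ((PySem.List.remove? l " ").getD l)
  else l
termination_by l.length
decreasing_by
  rw [PySem.List.remove?_eq_some_erase l " " h]
  simp only [Option.getD_some]
  rw [List.length_erase_of_mem h]
  have := List.length_pos_of_mem h
  omega

def spliter (string : String) : List String :=
  pvRemoveSpaces (pvFlushA (string.toList.foldl pvStepA ([], [])))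

-- ===== PORT B =====
-- Source B's ALNUM constant, the same explicit character set
def pvAlnum : List Char :=
  "ABCDEFGHIJKLMNOPQRSTUVWXYZabcdefghijklmnopqrstuvwxyz0123456789".toList

-- Source B's index loop as structural recursion on the remaining characters; the inner
-- 'while j < n and string[j] in ALNUM' scan plus the slice string[i:j] are takeWhile/dropWhile.
def pvTokenize : List Char → List String
  | [] => []
  | c :: cs =>
    if c ∈ pvAlnum then
      String.ofList (c :: cs.takeWhile (fun x => decide (x ∈ pvAlnum))) ::
        pvTokenize (cs.dropWhile (fun x => decide (x ∈ pvAlnum)))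
    else if c = ' ' then pvTokenize cs
    else String.ofList [c] :: pvTokenize cs
termination_by l => l.length
decreasing_by
  · have := List.length_dropWhile_le (p := fun x => decide (x ∈ pvAlnum)) (l := cs)
    simp; omega
  · simp
  · simp

def spliter_alt (string : String) : List String := pvTokenize string.toList

-- ===== PRECONDITION & SPEC =====
def Spec_spliter (string : String) (out : List String) : Prop := out = spliter_alt string
instance (string : String) (out : List String) : Decidable (Spec_spliter string out) := by unfold Spec_spliter; infer_instance

-- ===== CLAIM (what is proved, stated in full; the proofs are below) =====
def Claim_equal_spliter : Prop := ∀ (string : String), Dom_spliter string → Spec_spliter string (spliter string)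

-- ===== LEMMAS AND PROOFS =====

-- A's character class and B's character set admit the same characters
theorem pvClass_iff (c : Char) :
    (c ∈ pvEnglish.toList ∨ c ∈ (PySem.Str.upper pvEnglish).toList) ↔ c ∈ pvAlnum := by
  have h1 : ((pvEnglish.toList ++ (PySem.Str.upper pvEnglish).toList).all
      (fun x => decide (x ∈ pvAlnum))) = true := by decide
  have h2 : (pvAlnum.all
      (fun x => decide (x ∈ pvEnglish.toList ++ (PySem.Str.upper pvEnglish).toList))) = true := by
    decide
  constructor
  · intro h
    exact of_decide_eq_true (List.all_eq_true.mp h1 c (List.mem_append.mpr h))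
  · intro h
    exact List.mem_append.mp (of_decide_eq_true (List.all_eq_true.mp h2 c h))

theorem pvSpace_not_alnum : ¬ (' ' ∈ pvAlnum) := by decide

theorem pvOfList_ne_space (buf : List Char) (hall : ∀ x ∈ buf, x ∈ pvAlnum) :
    (String.ofList buf != " ") = true := by
  simp only [bne_iff_ne, ne_eq]
  intro hcontra
  have hb : buf = [' '] := by
    have := congrArg String.toList hcontra
    simpa using this
  exact pvSpace_not_alnum (hall ' ' (by simp [hb]))

-- the repeated-remove loop removes exactly all spaces
theorem pvRemoveSpaces_aux (n : Nat) :
    ∀ l : List String, l.length ≤ n → pvRemoveSpaces l = l.filter (fun t => t != " ") := by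
  induction n with
  | zero =>
    intro l hl
    have : l = [] := List.eq_nil_of_length_eq_zero (Nat.le_zero.mp hl)
    subst this
    rw [pvRemoveSpaces]; simp
  | succ n ih =>
    intro l hl
    rw [pvRemoveSpaces]
    by_cases h : " " ∈ l
    · rw [dif_pos h, PySem.List.remove?_eq_some_erase l " " h]
      simp only [Option.getD_some]
      have hlen : (l.erase " ").length ≤ n := by
        rw [List.length_erase_of_mem h]
        have := List.length_pos_of_mem h
        omega
      rw [ih _ hlen]
      obtain ⟨s, t, _, hl1, hl2⟩ := List.exists_erase_eq h
      rw [hl2, hl1]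
      simp [List.filter_append]
    · rw [dif_neg h]
      refine (List.filter_eq_self.mpr ?_).symm
      intro x hx
      simp only [bne_iff_ne, ne_eq]
      intro hxe; exact h (hxe ▸ hx)

theorem pvRemoveSpaces_eq_filter (l : List String) :
    pvRemoveSpaces l = l.filter (fun t => t != " ") := pvRemoveSpaces_aux l.length l le_rfl

-- A's emitted token stream as a function of the remaining input and current buffer
def pvEmit : List Char → List Char → List String
  | buf, [] => if buf = [] then [] else [String.ofList buf]
  | buf, c :: cs =>
    if c ∈ pvEnglish.toList ∨ c ∈ (PySem.Str.upper pvEnglish).toList then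
      pvEmit (buf ++ [c]) cs
    else
      (if buf = [] then [] else [String.ofList buf]) ++ String.ofList [c] :: pvEmit [] cs
termination_by _ l => l.length
decreasing_by all_goals simp

-- A's fold produces exactly the emitted stream
theorem pvFoldA_eq_emit (cs : List Char) :
    ∀ (out : List String) (buf : List Char),
      pvFlushA (cs.foldl pvStepA (out, buf)) = out ++ pvEmit buf cs := by
  induction cs with
  | nil =>
    intro out buf
    by_cases hb : buf = [] <;> simp [pvFlushA, pvEmit, hb]
  | cons c cs ih =>
    intro out buf
    by_cases hc : c ∈ pvEnglish.toList ∨ c ∈ (PySem.Str.upper pvEnglish).toList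
    · rw [List.foldl_cons]
      rw [show pvStepA (out, buf) c = (out, buf ++ [c]) from by unfold pvStepA; rw [if_pos hc]]
      rw [ih, pvEmit, if_pos hc]
    · rw [List.foldl_cons]
      rw [show pvStepA (out, buf) c =
          ((if buf ≠ [] then out ++ [String.ofList buf] else out) ++ [String.ofList [c]], [])
        from by unfold pvStepA; rw [if_neg hc]]
      rw [ih, pvEmit, if_neg hc]
      by_cases hb : buf = [] <;> simp [hb]

-- filtering the spaces out of the emitted stream yields B's tokenization
theorem pvEmit_filter (cs : List Char) :
    ∀ buf : List Char, (∀ x ∈ buf, x ∈ pvAlnum) →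
      (pvEmit buf cs).filter (fun t => t != " ") =
        if buf = [] then pvTokenize cs
        else String.ofList (buf ++ cs.takeWhile (fun x => decide (x ∈ pvAlnum))) ::
               pvTokenize (cs.dropWhile (fun x => decide (x ∈ pvAlnum))) := by
  induction cs with
  | nil =>
    intro buf hall
    by_cases hb : buf = []
    · simp [pvEmit, pvTokenize, hb]
    · simp [pvEmit, hb, List.filter, pvOfList_ne_space buf hall, pvTokenize]
  | cons c cs ih =>
    intro buf hall
    by_cases hc : c ∈ pvAlnum
    · rw [pvEmit, if_pos ((pvClass_iff c).mpr hc)]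
      have hall' : ∀ x ∈ buf ++ [c], x ∈ pvAlnum := by
        intro x hx
        rcases List.mem_append.mp hx with h | h
        · exact hall x h
        · simpa using (List.mem_singleton.mp h) ▸ hc
      rw [ih (buf ++ [c]) hall']
      rw [if_neg (by simp)]
      by_cases hb : buf = []
      · subst hb
        rw [if_pos rfl, pvTokenize, if_pos hc]
        simp [List.takeWhile_cons, List.dropWhile_cons, hc]
      · rw [if_neg hb]
        simp [List.takeWhile_cons, List.dropWhile_cons, hc]
    · rw [pvEmit, if_neg (fun h => hc ((pvClass_iff c).mp h))]
      rw [List.filter_append, List.filter_cons, ih [] (by simp), if_pos rfl]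
      have htake : (c :: cs).takeWhile (fun x => decide (x ∈ pvAlnum)) = [] := by
        simp [hc]
      have hdrop : (c :: cs).dropWhile (fun x => decide (x ∈ pvAlnum)) = c :: cs := by
        simp [hc]
      have htok : pvTokenize (c :: cs) =
          if c = ' ' then pvTokenize cs else String.ofList [c] :: pvTokenize cs := by
        rw [pvTokenize, if_neg hc]
      rw [htake, hdrop, htok]
      by_cases hsp : c = ' '
      · subst hsp
        have hflt : ((String.ofList [' '] != " ") = false) := by decide
        by_cases hb : buf = []
        · subst hb; simp [hflt]
        · simp [hb, List.filter, pvOfList_ne_space buf hall]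
      · have hne : (String.ofList [c] != " ") = true := by
          simp only [bne_iff_ne, ne_eq]
          intro hcontra
          exact hsp (by simpa using congrArg String.toList hcontra)
        by_cases hb : buf = []
        · subst hb; simp [hne, hsp]
        · simp [hb, List.filter, pvOfList_ne_space buf hall, hne, hsp]

-- ===== VERDICT (by name: the statement is the Claim_ definition above) =====
theorem spliter_spec : Claim_equal_spliter := by
  intro string _
  unfold Spec_spliter spliter spliter_alt
  rw [pvFoldA_eq_emit string.toList [] []]
  rw [List.nil_append, pvRemoveSpaces_eq_filter]
  rw [pvEmit_filter string.toList [] (by simp)]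
  rw [if_pos rfl]
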